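-- pv_equiv track=rewrite | github.com/EugeneChecheta/LUTOhayse.bots | Constaruction_CA.py | calculate_sizes
-- ===== SOURCE A (Python) =====
-- def calculate_sizes(modules, module_lengths):
--     """Вычисляет размеры дивана на основе последовательности модулей"""
--     if len(modules) <= 1:
--         if modules and modules[0] in module_lengths:
--             return [str(module_lengths[modules[0]])]
--         return []
--
--     # Находим индексы угловых модулей (06), которые не на краях
--     split_indices = []
--     for i, module in enumerate(modules):
--         if module == "06" and 0 < i < len(modules) - 1:
--             split_indices.append(i)
--
--     if not split_indices:
--         total = sum(module_lengths.get(m, 0) for m in modules)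
--         return [str(total)]
--
--     sizes = []
--     start_idx = 0
--
--     for split_idx in split_indices:
--         segment = modules[start_idx:split_idx + 1]
--         size = sum(module_lengths.get(m, 0) for m in segment)
--         sizes.append(str(size))
--         start_idx = split_idx
--
--     last_segment = modules[start_idx:]
--     last_size = sum(module_lengths.get(m, 0) for m in last_segment)
--     sizes.append(str(last_size))
--
--     return sizes
-- ===== SOURCE B (Python) =====
-- def calculate_sizes(modules, module_lengths):
--     """One pass: running sum, emitted and reseeded at interior corner modules."""
--     if len(modules) <= 1:
--         if modules and modules[0] in module_lengths:
--             return [str(module_lengths[modules[0]])]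
--         return []
--     n = len(modules)
--     sizes = []
--     running = 0
--     for i, m in enumerate(modules):
--         running += module_lengths.get(m, 0)
--         if m == "06" and 0 < i < n - 1:
--             sizes.append(str(running))
--             running = module_lengths.get(m, 0)
--     sizes.append(str(running))
--     return sizes
-- ===== Notes on version B (the rewrite author's own statement) =====
-- stated objective: simpler
-- what changed: Replaces the two-phase corner-index collection plus repeated slicing-and-summing with a single pass that keeps a running sum, emitting it at each interior corner and reseeding with the corner's length to reproduce the one-element segment overlap.
import Mathlib
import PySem

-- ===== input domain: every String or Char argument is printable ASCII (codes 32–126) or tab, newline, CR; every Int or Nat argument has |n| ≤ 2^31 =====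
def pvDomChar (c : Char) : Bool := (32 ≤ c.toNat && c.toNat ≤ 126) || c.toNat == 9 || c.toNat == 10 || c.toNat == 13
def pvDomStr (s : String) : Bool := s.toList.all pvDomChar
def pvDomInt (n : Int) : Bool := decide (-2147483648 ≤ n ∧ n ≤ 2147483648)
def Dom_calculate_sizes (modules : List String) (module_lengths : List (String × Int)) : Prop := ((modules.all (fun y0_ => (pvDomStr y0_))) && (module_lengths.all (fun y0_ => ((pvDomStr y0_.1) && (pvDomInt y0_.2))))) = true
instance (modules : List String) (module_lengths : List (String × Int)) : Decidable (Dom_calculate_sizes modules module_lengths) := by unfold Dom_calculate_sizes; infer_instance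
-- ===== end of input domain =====

-- B replaces A's corner-index collection plus per-segment slicing/summing by a single
-- running-sum pass (objective: simpler; same return value everywhere).

-- ===== PORT A =====
def calculate_sizes (modules : List String) (module_lengths : List (String × Int)) : List String :=
  if modules.length ≤ 1 then
    match modules with
    | [] => []
    | m :: _ =>
      match PySem.Dict.get? (PySem.Dict.mk module_lengths) m with
      | some v => [PySem.Int.toStr v]
      | none => []
  else
    let n : Int := modules.length
    let split_indices : List Int :=
      (PySem.List.enumerate modules 0).foldl
        (fun acc p => if p.2 = "06" ∧ 0 < p.1 ∧ p.1 < n - 1 then acc ++ [p.1] else acc) []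
    if split_indices = [] then
      [PySem.Int.toStr (modules.foldl
        (fun s m => s + PySem.Dict.getD (PySem.Dict.mk module_lengths) m 0) 0)]
    else
      let r := split_indices.foldl
        (fun (st : List String × Int) split_idx =>
          let segment := PySem.List.slice modules (some st.2) (some (split_idx + 1))
          (st.1 ++ [PySem.Int.toStr (segment.foldl
            (fun s m => s + PySem.Dict.getD (PySem.Dict.mk module_lengths) m 0) 0)], split_idx))
        ([], 0)
      let last_segment := PySem.List.slice modules (some r.2) none
      r.1 ++ [PySem.Int.toStr (last_segment.foldl
        (fun s m => s + PySem.Dict.getD (PySem.Dict.mk module_lengths) m 0) 0)]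

-- ===== PORT B =====
def calculate_sizes_alt (modules : List String) (module_lengths : List (String × Int)) : List String :=
  if modules.length ≤ 1 then
    match modules with
    | [] => []
    | m :: _ =>
      match PySem.Dict.get? (PySem.Dict.mk module_lengths) m with
      | some v => [PySem.Int.toStr v]
      | none => []
  else
    let n : Int := modules.length
    let st := (PySem.List.enumerate modules 0).foldl
      (fun (st : List String × Int) p =>
        let running := st.2 + PySem.Dict.getD (PySem.Dict.mk module_lengths) p.2 0
        if p.2 = "06" ∧ 0 < p.1 ∧ p.1 < n - 1 then
          (st.1 ++ [PySem.Int.toStr running], PySem.Dict.getD (PySem.Dict.mk module_lengths) p.2 0)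
        else (st.1, running))
      ([], 0)
    st.1 ++ [PySem.Int.toStr st.2]

-- ===== PRECONDITION & SPEC =====
def Spec_calculate_sizes (modules : List String) (module_lengths : List (String × Int)) (out : List String) : Prop := out = calculate_sizes_alt modules module_lengths
instance (modules : List String) (module_lengths : List (String × Int)) (out : List String) : Decidable (Spec_calculate_sizes modules module_lengths out) := by unfold Spec_calculate_sizes; infer_instance

-- ===== CLAIM (what is proved, stated in full; the proofs are below) =====
def Claim_equal_calculate_sizes : Prop := ∀ (modules : List String) (module_lengths : List (String × Int)), Dom_calculate_sizes modules module_lengths → Spec_calculate_sizes modules module_lengths (calculate_sizes modules module_lengths)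

-- ===== LEMMAS AND PROOFS =====

-- weight of one module
def pvW (ml : List (String × Int)) (m : String) : Int :=
  PySem.Dict.getD (PySem.Dict.mk ml) m 0

-- sum of weights of a segment
def pvSum (ml : List (String × Int)) (xs : List String) : Int :=
  (xs.map (pvW ml)).sum

-- the common recursive specification: running sum, emitted at interior corners
def pvGo (ml : List (String × Int)) : List String → Int → List String
  | [], run => [PySem.Int.toStr run]
  | m :: rest, run =>
    if m = "06" ∧ rest ≠ [] then
      PySem.Int.toStr (run + pvW ml m) :: pvGo ml rest (pvW ml m)
    else
      pvGo ml rest (run + pvW ml m)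

-- foldl-sum of the ports, in pvSum form
theorem pvSum_foldl (ml : List (String × Int)) (xs : List String) :
    xs.foldl (fun s m => s + PySem.Dict.getD (PySem.Dict.mk ml) m 0) 0 = pvSum ml xs := by
  rw [PySem.List.foldl_add]; simp only [pvSum, zero_add]; rfl

-- if-append foldl as filter+map
theorem pvFoldAppendIf {α β : Type} (p : α → Prop) [DecidablePred p] (f : α → β) :
    ∀ (l : List α) (acc : List β),
      l.foldl (fun acc x => if p x then acc ++ [f x] else acc) acc
        = acc ++ (l.filter (fun x => decide (p x))).map f := by
  intro l; induction l with
  | nil => simp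
  | cons x xs ih =>
    intro acc
    by_cases h : p x <;> simp [h, ih]

-- enumerate with shifted start
theorem pvEnumShift {α : Type} (xs : List α) : ∀ (a b : Int),
    PySem.List.enumerate xs (a + b) = (PySem.List.enumerate xs b).map (fun p => (p.1 + a, p.2)) := by
  induction xs with
  | nil => intro a b; simp [PySem.List.enumerate_nil]
  | cons x xs ih =>
    intro a b
    rw [PySem.List.enumerate_cons, PySem.List.enumerate_cons]
    have : a + b + 1 = a + (b + 1) := by ring
    simp [this, ih a (b + 1)]
    ring

-- B's loop over the tail computes pvGo
theorem pvB_fold (ml : List (String × Int)) (n : Int) : ∀ (rest : List String) (i : Int)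
    (sizes : List String) (run : Int), 1 ≤ i → i + rest.length = n →
    (let st := (PySem.List.enumerate rest i).foldl
      (fun (st : List String × Int) p =>
        let running := st.2 + PySem.Dict.getD (PySem.Dict.mk ml) p.2 0
        if p.2 = "06" ∧ 0 < p.1 ∧ p.1 < n - 1 then
          (st.1 ++ [PySem.Int.toStr running], PySem.Dict.getD (PySem.Dict.mk ml) p.2 0)
        else (st.1, running)) (sizes, run)
     st.1 ++ [PySem.Int.toStr st.2]) = sizes ++ pvGo ml rest run := by
  intro rest
  induction rest with
  | nil => intro i sizes run _ _; simp [PySem.List.enumerate_nil, pvGo]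
  | cons m rest ih =>
    intro i sizes run hi hn
    rw [PySem.List.enumerate_cons]
    have hn' : i + 1 + (rest.length : Int) = n := by push_cast [List.length_cons] at hn; omega
    have hcond : (m = "06" ∧ 0 < i ∧ i < n - 1) ↔ (m = "06" ∧ rest ≠ []) := by
      constructor
      · rintro ⟨h1, _, h3⟩
        exact ⟨h1, fun hnil => by subst hnil; simp at hn'; omega⟩
      · rintro ⟨h1, h2⟩
        have hr : 1 ≤ (rest.length : Int) := by
          cases rest with
          | nil => exact absurd rfl h2
          | cons a b => push_cast [List.length_cons]; omega
        exact ⟨h1, by omega, by omega⟩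
    by_cases h : m = "06" ∧ rest ≠ []
    · rw [List.foldl_cons]
      simp only [if_pos (hcond.mpr h)]
      rw [ih (i+1) _ _ (by omega) (by omega)]
      simp [pvGo, if_pos h, pvW]
    · rw [List.foldl_cons]
      simp only [if_neg (fun hc => h (hcond.mp hc))]
      rw [ih (i+1) _ _ (by omega) (by omega)]
      simp [pvGo, if_neg h, pvW]

-- B on a list of length ≥ 2
theorem pvB_eq_go (ml : List (String × Int)) (m : String) (tail : List String) (h : tail ≠ []) :
    calculate_sizes_alt (m :: tail) ml = pvGo ml tail (pvW ml m) := by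
  have hlen : ¬ (m :: tail).length ≤ 1 := by
    cases tail with
    | nil => exact absurd rfl h
    | cons a b => simp
  have hc : ¬ (m = "06" ∧ (0:Int) < 0 ∧ (0:Int) < ((m :: tail).length : Int) - 1) := by
    rintro ⟨_, h2, _⟩; omega
  have key := pvB_fold ml ((m :: tail).length : Int) tail 1 []
    (PySem.Dict.getD (PySem.Dict.mk ml) m 0) (by omega) (by push_cast [List.length_cons]; omega)
  rw [calculate_sizes_alt, if_neg hlen]
  simp only [PySem.List.enumerate_cons, List.foldl_cons, zero_add]
  rw [if_neg hc]
  rw [key]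
  simp [pvW]

-- go on a corner-free list is one total
theorem pvGo_nocorner (ml : List (String × Int)) : ∀ (xs : List String) (run : Int),
    "06" ∉ xs.dropLast → pvGo ml xs run = [PySem.Int.toStr (run + pvSum ml xs)] := by
  intro xs
  induction xs with
  | nil => intro run _; simp [pvGo, pvSum]
  | cons x xs ih =>
    intro run hx
    cases xs with
    | nil => simp [pvGo, pvSum]
    | cons y ys =>
      simp only [List.dropLast_cons₂, List.mem_cons, not_or] at hx
      rw [pvGo, if_neg (by rintro ⟨h1, _⟩; exact hx.1 h1.symm)]
      rw [ih (run + pvW ml x) hx.2]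
      congr 2
      simp [pvSum]
      ring

-- go chopped at the first interior corner
theorem pvGo_chop (ml : List (String × Int)) : ∀ (pre : List String) (post : List String) (run : Int),
    "06" ∉ pre → post ≠ [] →
    pvGo ml (pre ++ "06" :: post) run
      = PySem.Int.toStr (run + pvSum ml (pre ++ ["06"])) :: pvGo ml post (pvW ml "06") := by
  intro pre
  induction pre with
  | nil =>
    intro post run _ hpost
    rw [List.nil_append, pvGo, if_pos ⟨rfl, hpost⟩]
    simp [pvSum]
  | cons x pre ih =>
    intro post run hx hpost
    simp only [List.mem_cons, not_or] at hx
    rw [List.cons_append, pvGo, if_neg (by rintro ⟨h1, _⟩; exact hx.1 h1.symm)]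
    rw [ih post (run + pvW ml x) hx.2 hpost]
    congr 2
    simp [pvSum]
    ring

-- A's split-index loop as filter+map
def pvSplit (modules : List String) : List Int :=
  ((PySem.List.enumerate modules 0).filter
    (fun p => decide (p.2 = "06" ∧ 0 < p.1 ∧ p.1 < (modules.length : Int) - 1))).map (fun p => p.1)

-- one step of A's segment loop, in pvSum form
def pvAstep (ml : List (String × Int)) (modules : List String)
    (st : List String × Int) (i : Int) : List String × Int :=
  (st.1 ++ [PySem.Int.toStr (pvSum ml (PySem.List.slice modules (some st.2) (some (i + 1))))], i)

-- A's else branch, in pvSum/pvSplit form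
def pvA (ml : List (String × Int)) (modules : List String) : List String :=
  if pvSplit modules = [] then [PySem.Int.toStr (pvSum ml modules)]
  else
    let r := (pvSplit modules).foldl (pvAstep ml modules) ([], 0)
    r.1 ++ [PySem.Int.toStr (pvSum ml (PySem.List.slice modules (some r.2) none))]

theorem pvA_eq (ml : List (String × Int)) (modules : List String) (h : ¬ modules.length ≤ 1) :
    calculate_sizes modules ml = pvA ml modules := by
  rw [calculate_sizes.eq_def, if_neg h]
  simp only [pvFoldAppendIf, pvSum_foldl, List.nil_append]
  rw [pvA]
  simp only [pvSplit]
  rfl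

-- slicing after dropping a common prefix
theorem pvSliceDrop {α : Type} (xs : List α) (j : Nat) (a b : Int) (ha : 0 ≤ a) (hb : 0 ≤ b) :
    PySem.List.slice xs (some (a + (j : Int))) (some (b + (j : Int)))
      = PySem.List.slice (xs.drop j) (some a) (some b) := by
  rw [PySem.List.slice_toNat xs (by omega) (by omega),
    PySem.List.slice_toNat (xs.drop j) ha hb, List.drop_drop]
  congr 1
  · omega
  · congr 1
    omega

theorem pvSliceDropNone {α : Type} (xs : List α) (j : Nat) (a : Int) (ha : 0 ≤ a) :
    PySem.List.slice xs (some (a + (j : Int))) none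
      = PySem.List.slice (xs.drop j) (some a) none := by
  rw [PySem.List.slice_from xs (by omega), PySem.List.slice_from (xs.drop j) ha, List.drop_drop]
  congr 1
  omega

-- A's segment fold: a ready prefix of sizes passes through
theorem pvAfold_prefix (ml : List (String × Int)) (ms : List String) :
    ∀ (idxs : List Int) (pref sizes : List String) (start : Int),
    idxs.foldl (pvAstep ml ms) (pref ++ sizes, start)
      = (pref ++ (idxs.foldl (pvAstep ml ms) (sizes, start)).1,
         (idxs.foldl (pvAstep ml ms) (sizes, start)).2) := by
  intro idxs
  induction idxs with
  | nil => intro pref sizes start; simp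
  | cons i idxs ih =>
    intro pref sizes start
    simp only [List.foldl_cons, pvAstep, List.append_assoc]
    exact ih pref _ i

-- A's segment fold after translating all indices by j works on the dropped list
theorem pvAfold_shift (ml : List (String × Int)) (modules : List String) (j : Nat) :
    ∀ (idxs : List Int) (sizes : List String) (start : Int), 0 ≤ start → (∀ i ∈ idxs, 0 ≤ i) →
    (idxs.map (fun i => i + (j : Int))).foldl (pvAstep ml modules) (sizes, start + (j : Int))
      = ((idxs.foldl (pvAstep ml (modules.drop j)) (sizes, start)).1,
         (idxs.foldl (pvAstep ml (modules.drop j)) (sizes, start)).2 + (j : Int)) := by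
  intro idxs
  induction idxs with
  | nil => intro sizes start _ _; simp
  | cons i idxs ih =>
    intro sizes start hs hmem
    have hi : 0 ≤ i := hmem i List.mem_cons_self
    simp only [List.map_cons, List.foldl_cons, pvAstep]
    have hsl : PySem.List.slice modules (some (start + (j : Int))) (some (i + (j : Int) + 1))
        = PySem.List.slice (modules.drop j) (some start) (some (i + 1)) := by
      have : i + (j : Int) + 1 = (i + 1) + (j : Int) := by ring
      rw [this, pvSliceDrop modules j start (i + 1) hs (by omega)]
    rw [hsl]
    exact ih _ i hi (fun x hx => hmem x (List.mem_cons_of_mem _ hx))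

-- the second component of A's fold stays nonnegative
theorem pvAfold_snd_nonneg (ml : List (String × Int)) (ms : List String) :
    ∀ (idxs : List Int) (sizes : List String) (start : Int), 0 ≤ start → (∀ i ∈ idxs, 0 ≤ i) →
    0 ≤ (idxs.foldl (pvAstep ml ms) (sizes, start)).2 := by
  intro idxs
  induction idxs with
  | nil => intro sizes start hs _; simpa using hs
  | cons i idxs ih =>
    intro sizes start hs hmem
    simp only [List.foldl_cons, pvAstep]
    exact ih _ i (hmem i List.mem_cons_self) (fun x hx => hmem x (List.mem_cons_of_mem _ hx))

-- every split index is nonnegative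
theorem pvSplit_nonneg (modules : List String) : ∀ i ∈ pvSplit modules, 0 ≤ i := by
  intro i hi
  simp only [pvSplit, List.mem_map, List.mem_filter] at hi
  obtain ⟨p, ⟨hp, _⟩, rfl⟩ := hi
  obtain ⟨k, hk, rfl⟩ := (PySem.List.mem_enumerate_iff _ _ _).mp hp
  simp

-- no interior corner ⇒ no split indices
theorem pvSplit_nil (m0 : String) (tail : List String) (h : "06" ∉ tail.dropLast) :
    pvSplit (m0 :: tail) = [] := by
  rw [pvSplit]
  simp only [List.map_eq_nil_iff, List.filter_eq_nil_iff]
  intro p hp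
  obtain ⟨k, hk, rfl⟩ := (PySem.List.mem_enumerate_iff _ _ _).mp hp
  simp only [decide_eq_true_eq, not_and]
  intro h1 h2 h3
  exfalso
  apply h
  cases k with
  | zero => simp at h2
  | succ k' =>
    have hlen : k' < tail.dropLast.length := by
      rw [List.length_dropLast]
      push_cast [List.length_cons] at h3
      omega
    have : tail.dropLast[k'] = "06" := by
      rw [List.getElem_dropLast]
      have : (m0 :: tail)[k' + 1] = tail[k']'(by rw [List.length_dropLast] at hlen; omega) := List.getElem_cons_succ ..
      rw [← this]
      simpa using h1
    rw [← this]
    exact List.getElem_mem hlen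

-- the first occurrence split of a member
theorem pvFirstSplit {α : Type} [DecidableEq α] {a : α} : ∀ {l : List α}, a ∈ l →
    ∃ s t, l = s ++ a :: t ∧ a ∉ s := by
  intro l
  induction l with
  | nil => intro h; cases h
  | cons x xs ih =>
    intro h
    by_cases hx : x = a
    · exact ⟨[], xs, by rw [hx, List.nil_append], by simp⟩
    · have h' : a ∈ xs := by
        rcases List.mem_cons.mp h with h | h
        · exact absurd h.symm hx
        · exact h
      obtain ⟨s, t, hst, hns⟩ := ih h'
      exact ⟨x :: s, t, by rw [hst, List.cons_append], by
        simp only [List.mem_cons, not_or]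
        exact ⟨fun hh => hx hh.symm, hns⟩⟩

-- split indices of a list with a first interior corner at position 1 + pre.length
theorem pvSplit_decomp (m0 : String) (pre post : List String)
    (hpre : "06" ∉ pre) (hpost : post ≠ []) :
    pvSplit (m0 :: (pre ++ "06" :: post))
      = ((pre.length + 1 : Nat) : Int)
          :: (pvSplit ("06" :: post)).map (fun i => i + ((pre.length + 1 : Nat) : Int)) := by
  have hpost1 : 1 ≤ post.length := List.length_pos_iff.mpr hpost
  have hsp : m0 :: (pre ++ "06" :: post) = (m0 :: pre) ++ ("06" :: post) := by simp
  rw [pvSplit, hsp, PySem.List.enumerate_append, List.filter_append]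
  rw [show ((0 : Int) + ((m0 :: pre).length : Int)) = ((m0 :: pre).length : Int) by ring]
  have h1 : (PySem.List.enumerate (m0 :: pre) 0).filter
      (fun p => decide (p.2 = "06" ∧ 0 < p.1 ∧ p.1 < (((m0 :: pre) ++ "06" :: post).length : Int) - 1)) = [] := by
    simp only [List.filter_eq_nil_iff]
    intro p hp
    obtain ⟨k, hk, rfl⟩ := (PySem.List.mem_enumerate_iff _ _ _).mp hp
    simp only [decide_eq_true_eq, not_and]
    intro hk06 hkpos _
    have hk1 : 1 ≤ k := by omega
    obtain ⟨k', rfl⟩ : ∃ k', k = k' + 1 := ⟨k - 1, by omega⟩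
    apply hpre
    rw [← hk06]
    have he : (m0 :: pre)[k' + 1] = pre[k']'(by simp at hk; omega) := List.getElem_cons_succ ..
    rw [he]
    exact List.getElem_mem _
  rw [h1, List.nil_append]
  rw [PySem.List.enumerate_cons]
  rw [List.filter_cons_of_pos (by
    simp only [decide_eq_true_eq]
    refine ⟨by trivial, ?_, ?_⟩
    · push_cast [List.length_cons]
      omega
    · push_cast [List.length_cons, List.length_append]
      omega)]
  rw [pvEnumShift post ((m0 :: pre).length : Int) 1]
  rw [List.filter_map]
  have h2 : (PySem.List.enumerate post 1).filter
      ((fun p => decide (p.2 = "06" ∧ 0 < p.1 ∧ p.1 < (((m0 :: pre) ++ "06" :: post).length : Int) - 1))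
        ∘ (fun p => (p.1 + ((m0 :: pre).length : Int), p.2)))
      = (PySem.List.enumerate post 1).filter
        (fun p => decide (p.2 = "06" ∧ 0 < p.1 ∧ p.1 < ((("06" :: post).length : Int)) - 1)) := by
    apply List.filter_congr
    intro p hp
    obtain ⟨k, hk, rfl⟩ := (PySem.List.mem_enumerate_iff _ _ _).mp hp
    simp only [Function.comp, decide_eq_decide]
    constructor
    · rintro ⟨ha, hb, hc⟩
      refine ⟨ha, ?_, ?_⟩ <;> push_cast [List.length_cons, List.length_append] at hb hc ⊢ <;> omega
    · rintro ⟨ha, hb, hc⟩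
      refine ⟨ha, ?_, ?_⟩ <;> push_cast [List.length_cons, List.length_append] at hb hc ⊢ <;> omega
  rw [h2]
  rw [pvSplit, PySem.List.enumerate_cons]
  rw [List.filter_cons_of_neg (by simp)]
  simp only [List.map_cons, List.map_map, List.length_cons, zero_add]
  rfl

-- A chopped at the first interior corner
theorem pvA_chop (ml : List (String × Int)) (m0 : String) (pre post : List String)
    (hpre : "06" ∉ pre) (hpost : post ≠ []) :
    pvA ml (m0 :: (pre ++ "06" :: post))
      = PySem.Int.toStr (pvSum ml (m0 :: (pre ++ ["06"]))) :: pvA ml ("06" :: post) := by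
  have hsp : m0 :: (pre ++ "06" :: post) = (m0 :: (pre ++ ["06"])) ++ post := by simp
  have hsp2 : m0 :: (pre ++ "06" :: post) = (m0 :: pre) ++ ("06" :: post) := by simp
  have hdrop : (m0 :: (pre ++ "06" :: post)).drop (pre.length + 1) = "06" :: post := by
    rw [hsp2]
    exact List.drop_left' (by simp)
  have hslice1 : PySem.List.slice (m0 :: (pre ++ "06" :: post)) (some 0)
      (some (((pre.length + 1 : Nat) : Int) + 1)) = m0 :: (pre ++ ["06"]) := by
    rw [PySem.List.slice_toNat _ le_rfl (by omega)]
    simp only [Int.toNat_zero, Nat.sub_zero, List.drop_zero]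
    rw [show (((pre.length + 1 : Nat) : Int) + 1).toNat = (m0 :: (pre ++ ["06"])).length by simp; omega]
    rw [hsp]
    exact List.take_left' rfl
  have hhead : pvAstep ml (m0 :: (pre ++ "06" :: post)) ([], 0) ((pre.length + 1 : Nat) : Int)
      = ([PySem.Int.toStr (pvSum ml (m0 :: (pre ++ ["06"])))], ((pre.length + 1 : Nat) : Int)) := by
    simp only [pvAstep, List.nil_append]
    rw [hslice1]
  have hS := pvSplit_nonneg ("06" :: post)
  have key := pvAfold_shift ml (m0 :: (pre ++ "06" :: post)) (pre.length + 1)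
      (pvSplit ("06" :: post)) [PySem.Int.toStr (pvSum ml (m0 :: (pre ++ ["06"])))] 0 le_rfl hS
  rw [hdrop] at key
  simp only [zero_add] at key
  have keypre := pvAfold_prefix ml ("06" :: post) (pvSplit ("06" :: post))
      [PySem.Int.toStr (pvSum ml (m0 :: (pre ++ ["06"])))] [] 0
  simp only [List.append_nil] at keypre
  have hF2 : 0 ≤ (List.foldl (pvAstep ml ("06" :: post)) ([], 0) (pvSplit ("06" :: post))).2 :=
    pvAfold_snd_nonneg ml ("06" :: post) (pvSplit ("06" :: post)) [] 0 le_rfl hS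
  have hslice2 : PySem.List.slice (m0 :: (pre ++ "06" :: post))
      (some ((List.foldl (pvAstep ml ("06" :: post)) ([], 0) (pvSplit ("06" :: post))).2
        + ((pre.length + 1 : Nat) : Int))) none
      = PySem.List.slice ("06" :: post)
          (some (List.foldl (pvAstep ml ("06" :: post)) ([], 0) (pvSplit ("06" :: post))).2) none := by
    rw [pvSliceDropNone _ (pre.length + 1) _ hF2, hdrop]
  rw [pvA, pvSplit_decomp m0 pre post hpre hpost, if_neg (by simp)]
  simp only [List.foldl_cons]
  rw [hhead, key, keypre, hslice2]
  rw [pvA]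
  by_cases hSnil : pvSplit ("06" :: post) = []
  · rw [if_pos hSnil]
    simp [hSnil]
  · rw [if_neg hSnil]
    simp

-- A's else branch is pvGo on the tail
theorem pvA_eq_go (ml : List (String × Int)) : ∀ (N : Nat) (m0 : String) (tail : List String),
    (m0 :: tail).length ≤ N → tail ≠ [] →
    pvA ml (m0 :: tail) = pvGo ml tail (pvW ml m0) := by
  intro N
  induction N with
  | zero => intro m0 tail h _; simp at h
  | succ N ih =>
    intro m0 tail hlen htail
    by_cases h06 : "06" ∈ tail.dropLast
    · obtain ⟨pre, mid, hsplit, hpre⟩ := pvFirstSplit h06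
      have hde : tail = pre ++ "06" :: (mid ++ [tail.getLast htail]) := by
        conv_lhs => rw [← List.dropLast_append_getLast htail]
        rw [hsplit]
        simp
      have hpostne : mid ++ [tail.getLast htail] ≠ [] := by simp
      have hlen' : ("06" :: (mid ++ [tail.getLast htail])).length ≤ N := by
        have h2 := congrArg List.length hde
        simp only [List.length_cons, List.length_append, List.length_nil] at h2 hlen ⊢
        omega
      rw [hde, pvA_chop ml m0 pre _ hpre hpostne, pvGo_chop ml pre _ (pvW ml m0) hpre hpostne,
        ih "06" _ hlen' hpostne]
      congr 2
    · rw [pvGo_nocorner ml tail _ h06]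
      rw [pvA, if_pos (pvSplit_nil m0 tail h06)]
      simp [pvSum]

theorem calculate_sizes_spec : Claim_equal_calculate_sizes := by
  unfold Claim_equal_calculate_sizes
  intro modules ml _
  unfold Spec_calculate_sizes
  by_cases h : modules.length ≤ 1
  · rw [calculate_sizes.eq_def, calculate_sizes_alt.eq_def, if_pos h, if_pos h]
  · cases modules with
    | nil => simp at h
    | cons m0 tail =>
      have htail : tail ≠ [] := by
        cases tail with
        | nil => simp at h
        | cons a b => simp
      rw [pvA_eq ml _ h, pvB_eq_go ml m0 tail htail,
        pvA_eq_go ml ((m0 :: tail).length) m0 tail le_rfl htail]
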